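-- pv_equiv track=rewrite | github.com/arifkhan1990/Competitive-Programming | Codingninjas/Basic Algo/Two PointerTechnique/Minimum-operation-needed-to-convert.py | minCostToGivenString
-- ===== SOURCE A (Python) =====
-- def minCostToGivenString(str1, str2) :
--     if len(str1) < len(str2):
--         return -1
--
--     cnt , idx1, idx2 = 0, 0, 0
--
--     while idx1 < len(str1) and idx2 < len(str2):
--         if str1[idx1] == str2[idx2]:
--             idx1, idx2 = idx1 + 1, idx2 + 1
--         else:
--             cnt += 1
--             idx1 += 1
--     return cnt
-- ===== SOURCE B (Python) =====
-- def minCostToGivenString(str1, str2):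
--     if len(str1) < len(str2):
--         return -1
--     # index pass: positions of each character of str1, in increasing order
--     pos = {}
--     for i, ch in enumerate(str1):
--         pos.setdefault(ch, []).append(i)
--     idx = 0       # first position of str1 still usable
--     matched = 0   # pattern characters matched so far
--     for ch in str2:
--         lst = pos.get(ch, [])
--         # binary search: first position in lst that is >= idx
--         lo, hi = 0, len(lst)
--         while lo < hi:
--             mid = (lo + hi) // 2
--             if lst[mid] < idx:
--                 lo = mid + 1
--             else:
--                 hi = mid
--         if lo == len(lst):
--             return len(str1) - matched
--         idx = lst[lo] + 1
--         matched += 1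
--     return idx - matched
-- ===== Notes on version B (the rewrite author's own statement) =====
-- stated objective: alternative
-- what changed: B first builds a char->sorted-positions index of str1 in one pass, then for each character of str2 binary-searches that index for the first usable position, computing the answer from the final position and the number of matched characters, instead of A's char-by-char two-pointer walk over str1.
import Mathlib
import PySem

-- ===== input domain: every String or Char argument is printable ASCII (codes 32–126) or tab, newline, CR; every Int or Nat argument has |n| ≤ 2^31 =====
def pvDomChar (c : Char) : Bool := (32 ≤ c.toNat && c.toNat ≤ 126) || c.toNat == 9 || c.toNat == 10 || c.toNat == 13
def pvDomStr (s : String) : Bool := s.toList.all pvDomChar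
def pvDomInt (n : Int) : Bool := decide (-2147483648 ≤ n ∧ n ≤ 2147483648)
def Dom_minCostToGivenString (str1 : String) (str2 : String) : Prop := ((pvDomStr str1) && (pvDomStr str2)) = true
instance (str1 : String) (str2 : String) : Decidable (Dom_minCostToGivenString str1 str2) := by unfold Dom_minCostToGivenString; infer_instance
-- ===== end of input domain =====

-- B replaces A's two-pointer walk over str1 by a char→positions index of str1 built once,
-- binary-searched for each character of str2 (alternative algorithm, same exact result).

-- ===== PORT A =====
-- A's while loop over idx1/idx2; the two suffixes str1[idx1:], str2[idx2:] are the recursion state.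
def pvALoop : List Char → List Char → Int → Int
  | [], _, cnt => cnt
  | _ :: _, [], cnt => cnt
  | x :: xs, y :: ys, cnt =>
    if x == y then pvALoop xs ys cnt else pvALoop xs (y :: ys) (cnt + 1)

def minCostToGivenString (str1 : String) (str2 : String) : Int :=
  if PySem.Str.len str1 < PySem.Str.len str2 then -1
  else pvALoop str1.toList str2.toList 0

-- ===== PORT B =====
-- Source B's index pass: pos.setdefault(ch, []).append(i) == pos[ch] = pos.get(ch, []) + [i]
def pvBuild (s : List Char) : PySem.Dict Char (List Int) :=
  (PySem.List.enumerate s).foldl (fun d p => d.modify p.2 [] (· ++ [p.1])) PySem.Dict.empty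

-- Source B's hand-written lower-bound while loop (lo, hi).  lst[mid] is in range on every call
-- Source B makes (mid < hi ≤ len(lst)), so Python's lst[mid] never raises; ported as getD.
def pvBsearch (lst : List Int) (target : Int) (lo hi : Nat) : Nat :=
  if lo < hi then
    let mid := (lo + hi) / 2
    if lst.getD mid 0 < target then pvBsearch lst target (mid + 1) hi
    else pvBsearch lst target lo mid
  else lo
termination_by hi - lo
decreasing_by all_goals omega

-- Source B's for-loop over str2 with state (idx, matched); the early returns are the base results.
def pvBLoop (s : List Char) (pos : PySem.Dict Char (List Int)) : List Char → Int → Int → Int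
  | [], idx, matched => idx - matched
  | c :: cs, idx, matched =>
    let lst := pos.getD c []
    let lo := pvBsearch lst idx 0 lst.length
    if lo = lst.length then (s.length : Int) - matched
    else pvBLoop s pos cs (lst.getD lo 0 + 1) (matched + 1)

def minCostToGivenString_alt (str1 : String) (str2 : String) : Int :=
  if PySem.Str.len str1 < PySem.Str.len str2 then -1
  else pvBLoop str1.toList (pvBuild str1.toList) str2.toList 0 0

-- ===== PRECONDITION & SPEC =====
def Spec_minCostToGivenString (str1 : String) (str2 : String) (out : Int) : Prop := out = minCostToGivenString_alt str1 str2
instance (str1 : String) (str2 : String) (out : Int) : Decidable (Spec_minCostToGivenString str1 str2 out) := by unfold Spec_minCostToGivenString; infer_instance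

-- ===== CLAIM (what is proved, stated in full; the proofs are below) =====
def Claim_equal_minCostToGivenString : Prop := ∀ (str1 : String) (str2 : String), Dom_minCostToGivenString str1 str2 → Spec_minCostToGivenString str1 str2 (minCostToGivenString str1 str2)

-- ===== LEMMAS AND PROOFS =====

-- Reference computation both loops are reduced to.
def pvAuxList : List Char → List Char → Int → Int
  | _, [], cnt => cnt
  | t, c :: cs, cnt =>
    if c ∈ t then pvAuxList (t.drop (t.idxOf c + 1)) cs (cnt + t.idxOf c)
    else cnt + t.length

theorem pvALoop_eq_aux (t p : List Char) (cnt : Int) : pvALoop t p cnt = pvAuxList t p cnt := by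
  induction t generalizing p cnt with
  | nil =>
    cases p with
    | nil => rfl
    | cons c cs => simp [pvALoop, pvAuxList]
  | cons x xs ih =>
    cases p with
    | nil => rfl
    | cons c cs =>
      by_cases hxc : x = c
      · subst hxc
        simp only [pvALoop, beq_self_eq_true, if_true]
        rw [ih cs cnt]
        simp [pvAuxList, List.idxOf_cons_self]
      · have hne : (x == c) = false := by simp [hxc]
        simp only [pvALoop, hne, Bool.false_eq_true, if_false]
        rw [ih (c :: cs) (cnt + 1)]
        by_cases hc : c ∈ xs
        · have hmem : c ∈ x :: xs := List.mem_cons_of_mem x hc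
          have hidx : (x :: xs).idxOf c = xs.idxOf c + 1 :=
            List.idxOf_cons_ne _ (fun hh => hxc hh)
          simp only [pvAuxList, if_pos hc, if_pos hmem, hidx, List.drop_succ_cons]
          congr 1
          push_cast
          ring
        · have hmem : c ∉ x :: xs := by
            simp only [List.mem_cons, not_or]
            exact ⟨fun hh => hxc hh.symm, hc⟩
          simp only [pvAuxList, if_neg hc, if_neg hmem, List.length_cons]
          push_cast
          ring

-- Sorted occurrence positions of c in s, offset by k: the value each pvBuild entry holds.
def pvPosFrom (k : Nat) (s : List Char) (c : Char) : List Int :=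
  match s with
  | [] => []
  | x :: xs => (if x = c then [(k : Int)] else []) ++ pvPosFrom (k + 1) xs c

theorem pvPosFrom_nil (k : Nat) (c : Char) : pvPosFrom k [] c = [] := rfl

theorem pvPosFrom_cons (k : Nat) (x : Char) (xs : List Char) (c : Char) :
    pvPosFrom k (x :: xs) c = (if x = c then [(k : Int)] else []) ++ pvPosFrom (k + 1) xs c := rfl

theorem pvBuild_getD_gen (s : List Char) (c : Char) :
    ∀ (k : Nat) (d : PySem.Dict Char (List Int)),
      ((PySem.List.enumerate s (k : Int)).foldl
        (fun d p => d.modify p.2 [] (· ++ [p.1])) d).getD c []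
      = d.getD c [] ++ pvPosFrom k s c := by
  induction s with
  | nil => intro k d; simp [PySem.List.enumerate_nil, pvPosFrom]
  | cons x xs ih =>
    intro k d
    rw [PySem.List.enumerate_cons, List.foldl_cons]
    have hcast : ((k : Int) + 1) = ((k + 1 : Nat) : Int) := by push_cast; ring
    rw [hcast, ih (k + 1) (d.modify x [] (· ++ [(k : Int)]))]
    rw [PySem.Dict.getD_modify]
    by_cases hcx : c = x
    · subst hcx
      rw [if_pos rfl, pvPosFrom_cons, if_pos rfl, List.append_assoc]
    · rw [if_neg hcx, pvPosFrom_cons, if_neg (fun hh => hcx hh.symm), List.nil_append]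

theorem pvBuild_getD (s : List Char) (c : Char) :
    (pvBuild s).getD c [] = pvPosFrom 0 s c := by
  have h := pvBuild_getD_gen s c 0 PySem.Dict.empty
  simpa [pvBuild, PySem.Dict.getD_empty] using h

theorem pvPosFrom_mem_lb (k : Nat) (s : List Char) (c : Char) :
    ∀ x ∈ pvPosFrom k s c, (k : Int) ≤ x := by
  induction s generalizing k with
  | nil => intro x hx; simp [pvPosFrom_nil] at hx
  | cons y ys ih =>
    intro x hx
    rw [pvPosFrom_cons] at hx
    rcases List.mem_append.mp hx with hx | hx
    · split_ifs at hx with h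
      · simp at hx; omega
      · simp at hx
    · have := ih (k + 1) x hx
      push_cast at this ⊢
      omega

theorem pvPosFrom_mem_ub (k : Nat) (s : List Char) (c : Char) :
    ∀ x ∈ pvPosFrom k s c, x < (k : Int) + s.length := by
  induction s generalizing k with
  | nil => intro x hx; simp [pvPosFrom_nil] at hx
  | cons y ys ih =>
    intro x hx
    rw [pvPosFrom_cons] at hx
    rcases List.mem_append.mp hx with hx | hx
    · split_ifs at hx with h
      · simp only [List.mem_singleton] at hx
        subst hx
        simp only [List.length_cons]
        push_cast
        omega
      · simp at hx
    · have := ih (k + 1) x hx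
      simp only [List.length_cons]
      push_cast at this ⊢
      omega

theorem pvPosFrom_eq_nil_iff (k : Nat) (s : List Char) (c : Char) :
    pvPosFrom k s c = [] ↔ c ∉ s := by
  induction s generalizing k with
  | nil => simp [pvPosFrom_nil]
  | cons y ys ih =>
    rw [pvPosFrom_cons]
    simp only [List.append_eq_nil_iff, List.mem_cons, not_or]
    constructor
    · rintro ⟨h1, h2⟩
      refine ⟨?_, (ih (k + 1)).mp h2⟩
      intro hcy; rw [if_pos hcy.symm] at h1; exact absurd h1 (by simp)
    · rintro ⟨h1, h2⟩
      exact ⟨by rw [if_neg (fun hh => h1 hh.symm)], (ih (k + 1)).mpr h2⟩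

theorem pvPosFrom_head (k : Nat) (s : List Char) (c : Char) (h : c ∈ s) :
    (pvPosFrom k s c).getD 0 0 = ((k + s.idxOf c : Nat) : Int) := by
  induction s generalizing k with
  | nil => simp at h
  | cons y ys ih =>
    by_cases hyc : y = c
    · subst hyc
      rw [pvPosFrom_cons, if_pos rfl, List.idxOf_cons_self]
      simp
    · have hc : c ∈ ys := by
        rcases List.mem_cons.mp h with h' | h'
        · exact absurd h'.symm hyc
        · exact h'
      have hidx : (y :: ys).idxOf c = ys.idxOf c + 1 := List.idxOf_cons_ne _ hyc
      rw [pvPosFrom_cons, if_neg hyc, List.nil_append, hidx]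
      rw [ih (k + 1) hc]
      congr 1
      omega

theorem pvPosFrom_split (s : List Char) (c : Char) :
    ∀ (idx k : Nat), idx ≤ s.length →
      pvPosFrom k s c = pvPosFrom k (s.take idx) c ++ pvPosFrom (k + idx) (s.drop idx) c := by
  induction s with
  | nil => intro idx k h; simp_all [pvPosFrom_nil]
  | cons y ys ih =>
    intro idx k h
    cases idx with
    | zero => simp [pvPosFrom_nil]
    | succ n =>
      simp only [List.take_succ_cons, List.drop_succ_cons]
      have hn : n ≤ ys.length := by
        simp only [List.length_cons] at h
        omega
      rw [pvPosFrom_cons, pvPosFrom_cons, ih n (k + 1) hn, List.append_assoc]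
      have hk : k + 1 + n = k + (n + 1) := by omega
      rw [hk]

-- Invariant of Source B's while loop: the boundary elements seen so far bracket the target.
theorem pvBsearch_spec (lst : List Int) (target : Int) :
    ∀ (n lo hi : Nat), hi - lo < n → lo ≤ hi → hi ≤ lst.length →
      (lo = 0 ∨ lst.getD (lo - 1) 0 < target) →
      (hi = lst.length ∨ ¬ lst.getD hi 0 < target) →
      lo ≤ pvBsearch lst target lo hi ∧ pvBsearch lst target lo hi ≤ hi ∧
      (pvBsearch lst target lo hi = 0 ∨ lst.getD (pvBsearch lst target lo hi - 1) 0 < target) ∧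
      (pvBsearch lst target lo hi = lst.length ∨
        ¬ lst.getD (pvBsearch lst target lo hi) 0 < target) := by
  intro n
  induction n with
  | zero => intro lo hi h; omega
  | succ m ih =>
    intro lo hi hfuel hle hlen hlo hhi
    rw [pvBsearch]
    by_cases hlt : lo < hi
    · rw [if_pos hlt]
      by_cases hmid : lst.getD ((lo + hi) / 2) 0 < target
      · simp only [hmid, if_true]
        have h1 := ih ((lo + hi) / 2 + 1) hi (by omega) (by omega) hlen
          (Or.inr (by simpa using hmid)) hhi
        exact ⟨by omega, h1.2.1, h1.2.2⟩
      · simp only [hmid, if_false]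
        have h1 := ih lo ((lo + hi) / 2) (by omega) (by omega) (by omega) hlo
          (Or.inr hmid)
        exact ⟨h1.1, by omega, h1.2.2⟩
    · rw [if_neg hlt]
      have : lo = hi := by omega
      subst this
      exact ⟨le_refl _, le_refl _, hlo, hhi⟩

-- The lower bound of a split list: Source B's search lands exactly at the boundary.
theorem pvBsearch_split (L1 L2 : List Int) (target : Int)
    (h1 : ∀ x ∈ L1, x < target) (h2 : ∀ x ∈ L2, target ≤ x) :
    pvBsearch (L1 ++ L2) target 0 (L1 ++ L2).length = L1.length := by
  set lst := L1 ++ L2 with hlst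
  obtain ⟨_, hr2, hr3, hr4⟩ := pvBsearch_spec lst target (lst.length + 1) 0 lst.length
    (by omega) (Nat.zero_le _) (le_refl _) (Or.inl rfl) (Or.inl rfl)
  set r := pvBsearch lst target 0 lst.length with hr
  have hlen : lst.length = L1.length + L2.length := by simp [hlst]
  rcases Nat.lt_trichotomy r L1.length with hcase | hcase | hcase
  · exfalso
    have hget : lst.getD r 0 = L1.getD r 0 := by
      rw [hlst]; exact List.getD_append _ _ _ _ hcase
    have hmem : L1.getD r 0 ∈ L1 := by
      rw [List.getD_eq_getElem _ _ hcase]; exact List.getElem_mem _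
    have := h1 _ hmem
    rcases hr4 with h | h
    · omega
    · rw [hget] at h; exact h this
  · exact hcase
  · exfalso
    have hrpos : r ≠ 0 := by omega
    have hidx : r - 1 < lst.length := by omega
    have hge : L1.length ≤ r - 1 := by omega
    have hget : lst.getD (r - 1) 0 = L2.getD (r - 1 - L1.length) 0 := by
      rw [hlst, List.getD_append_right _ _ _ _ hge]
    have hlt2 : r - 1 - L1.length < L2.length := by omega
    have hmem : L2.getD (r - 1 - L1.length) 0 ∈ L2 := by
      rw [List.getD_eq_getElem _ _ hlt2]; exact List.getElem_mem _
    have := h2 _ hmem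
    rcases hr3 with h | h
    · exact hrpos h
    · rw [hget] at h; omega

theorem pvBLoop_eq_aux (s : List Char) (cs : List Char) :
    ∀ (idx : Nat) (matched : Int), idx ≤ s.length →
      pvBLoop s (pvBuild s) cs (idx : Int) matched
        = pvAuxList (s.drop idx) cs ((idx : Int) - matched) := by
  induction cs with
  | nil => intro idx matched _; rfl
  | cons c cs ih =>
    intro idx matched hidx
    have hlst : (pvBuild s).getD c [] = pvPosFrom 0 s c := pvBuild_getD s c
    have hsplit : pvPosFrom 0 s c
        = pvPosFrom 0 (s.take idx) c ++ pvPosFrom idx (s.drop idx) c := by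
      have := pvPosFrom_split s c idx 0 hidx
      simpa using this
    set L1 := pvPosFrom 0 (s.take idx) c with hL1
    set L2 := pvPosFrom idx (s.drop idx) c with hL2
    have hallL1 : ∀ x ∈ L1, x < (idx : Int) := by
      intro x hx
      have := pvPosFrom_mem_ub 0 (s.take idx) c x hx
      have hlen : (s.take idx).length ≤ idx := by simp
      push_cast at this ⊢
      omega
    have hallL2 : ∀ x ∈ L2, (idx : Int) ≤ x := pvPosFrom_mem_lb idx (s.drop idx) c
    have hfind : pvBsearch (L1 ++ L2) (idx : Int) 0 (L1 ++ L2).length = L1.length :=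
      pvBsearch_split L1 L2 (idx : Int) hallL1 hallL2
    show (let lst := (pvBuild s).getD c []
          let lo := pvBsearch lst (idx : Int) 0 lst.length
          if lo = lst.length then (s.length : Int) - matched
          else pvBLoop s (pvBuild s) cs (lst.getD lo 0 + 1) (matched + 1))
        = pvAuxList (s.drop idx) (c :: cs) ((idx : Int) - matched)
    simp only [hlst, hsplit, hfind]
    by_cases hc : c ∈ s.drop idx
    · have hL2ne : L2 ≠ [] := by
        rw [hL2, Ne, pvPosFrom_eq_nil_iff]
        exact not_not_intro hc
      have hL2len : 0 < L2.length := List.length_pos_iff.mpr hL2ne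
      have hne : ¬ L1.length = (L1 ++ L2).length := by
        simp only [List.length_append]; omega
      rw [if_neg hne]
      have hget : (L1 ++ L2).getD L1.length 0 = L2.getD 0 0 := by
        rw [List.getD_append_right _ _ _ _ (le_refl _)]
        simp
      have hhead : L2.getD 0 0 = ((idx + (s.drop idx).idxOf c : Nat) : Int) :=
        pvPosFrom_head idx (s.drop idx) c hc
      set j := (s.drop idx).idxOf c with hj
      have hjlt : j < (s.drop idx).length := List.idxOf_lt_length_of_mem hc
      have hdroplen : (s.drop idx).length = s.length - idx := by simp
      have harg : (L1 ++ L2).getD L1.length 0 + 1 = ((idx + j + 1 : Nat) : Int) := by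
        rw [hget, hhead]; push_cast; ring
      rw [harg, ih (idx + j + 1) (matched + 1) (by omega)]
      have hdd : s.drop (idx + j + 1) = (s.drop idx).drop (j + 1) := by
        rw [List.drop_drop, Nat.add_assoc]
      simp only [pvAuxList, if_pos hc, ← hj, hdd]
      congr 1
      push_cast
      ring
    · have hL2nil : L2 = [] := (pvPosFrom_eq_nil_iff idx (s.drop idx) c).mpr hc
      have heq : L1.length = (L1 ++ L2).length := by simp [hL2nil]
      rw [if_pos heq]
      have hdroplen : (s.drop idx).length = s.length - idx := by simp
      simp only [pvAuxList, if_neg hc, hdroplen]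
      omega

-- ===== VERDICT (by name: the statement is the Claim_ definition above) =====
theorem minCostToGivenString_spec : Claim_equal_minCostToGivenString := by
  intro str1 str2 _
  unfold Spec_minCostToGivenString minCostToGivenString minCostToGivenString_alt
  by_cases h : PySem.Str.len str1 < PySem.Str.len str2
  · rw [if_pos h, if_pos h]
  · rw [if_neg h, if_neg h, pvALoop_eq_aux]
    have hb := pvBLoop_eq_aux str1.toList str2.toList 0 0 (Nat.zero_le _)
    simpa using hb.symm
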